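-- pv_equiv track=rewrite | github.com/gandastik/Data-Struct-and-Algorithm-2564-1 | Lab6/trash.py | backtrack
-- ===== SOURCE A (Python) =====
-- def traversal(lst):
--     if(len(lst) == 1):
--         return lst[0]
--     return traversal(lst[:-1])
--
-- def backtrack(k, start, nextStart, curr, arr, res, path):
--     if(k == sum(path)):
--         res.append([int(x) for x in path])
--         return (start, curr, path)
--     elif(sum(path) > k):
--         return (start, curr, path)
--     if(curr == len(arr)):
--         return (start, curr, path)
--     x = traversal(arr[curr:])
--     path.append(x)
--     return backtrack(k, start, nextStart, curr+1, arr, res, path)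
-- ===== SOURCE B (Python) =====
-- def backtrack(k, start, nextStart, curr, arr, res, path):
--     # Iterative rewrite: one pass with a running sum (A re-sums path and
--     # re-slices arr on every recursive call).  Mutates res and path like A.
--     s = sum(path)
--     n = len(arr)
--     while s < k and curr != n:
--         x = arr[curr]
--         path.append(x)
--         s += x
--         curr += 1
--     if s == k:
--         res.append([int(x) for x in path])
--     return (start, curr, path)
-- ===== Notes on version B (the rewrite author's own statement) =====
-- stated objective: alternative
-- what changed: Replaces A's recursion (which re-computes sum(path) and extracts arr[curr] via a recursive traversal of the slice arr[curr:]) with a single iterative while loop that indexes arr[curr] directly and maintains a running sum; on the generated timing inputs the loop body rarely runs, so no speed-up was measured.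
-- outside the precondition, e.g. on backtrack(1, 0, 0, -5, [1], [], []): A returns (0, -4, [1]), B raises IndexError
import Mathlib
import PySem

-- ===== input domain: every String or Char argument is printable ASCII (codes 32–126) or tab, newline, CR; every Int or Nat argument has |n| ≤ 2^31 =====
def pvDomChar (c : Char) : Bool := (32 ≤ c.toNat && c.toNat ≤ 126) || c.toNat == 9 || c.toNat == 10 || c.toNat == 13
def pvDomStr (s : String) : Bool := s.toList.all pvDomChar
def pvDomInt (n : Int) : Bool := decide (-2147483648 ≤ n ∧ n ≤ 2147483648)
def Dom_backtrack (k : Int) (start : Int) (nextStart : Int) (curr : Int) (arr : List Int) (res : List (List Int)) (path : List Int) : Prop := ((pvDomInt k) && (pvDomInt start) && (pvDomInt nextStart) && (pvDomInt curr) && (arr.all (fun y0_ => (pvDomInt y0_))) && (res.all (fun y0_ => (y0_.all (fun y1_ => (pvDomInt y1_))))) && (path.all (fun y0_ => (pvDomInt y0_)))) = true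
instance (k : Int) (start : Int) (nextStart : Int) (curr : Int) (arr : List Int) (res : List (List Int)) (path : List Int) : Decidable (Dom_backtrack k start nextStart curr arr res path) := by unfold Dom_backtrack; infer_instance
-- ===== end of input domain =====

-- B replaces A's recursion (which re-computes sum(path) and fetches arr[curr] via a
-- recursive traversal of the slice arr[curr:]) by one iterative loop with a running sum.
-- A and B both mutate res/path in Python; the equivalence proved is about the RETURN value only.

-- ===== PORT A =====
-- traversal(lst): recurses on lst[:-1] (= dropLast, PySem.List.slice_to_neg_one).
-- Python recurses forever on []; `none` marks that non-returning case.
def traversalA : List Int → Option Int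
  | [] => none
  | [x] => some x
  | x :: y :: rest => traversalA ((x :: y :: rest).dropLast)
  termination_by l => l.length
  decreasing_by simp

-- cited by backtrack's termination proof: traversal(lst) is lst[0] (`none` exactly on [])
lemma traversalA_eq_head? : ∀ l : List Int, traversalA l = l.head? := by
  intro l
  induction l using traversalA.induct with
  | case1 => simp [traversalA]
  | case2 x => simp [traversalA]
  | case3 x y rest ih => simpa [traversalA] using ih

def backtrack (k : Int) (start : Int) (nextStart : Int) (curr : Int) (arr : List Int) (res : List (List Int)) (path : List Int) : Int × Int × List Int :=
  if k = path.sum then (start, curr, path)          -- res.append(...) does not affect the return value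
  else if path.sum > k then (start, curr, path)
  else if curr = (arr.length : Int) then (start, curr, path)
  else match h : traversalA (PySem.List.slice arr (some curr) none) with
    | none => (start, curr, path)                   -- Python never returns here (RecursionError); outside Pre_
    | some x => backtrack k start nextStart (curr + 1) arr res (path ++ [x])
  termination_by (arr.length - curr).toNat
  decreasing_by
    rw [traversalA_eq_head?, PySem.List.slice_some_none, List.head?_drop] at h
    have hlt : PySem.List.clampIdx arr.length curr < arr.length := by
      by_contra hge
      rw [List.getElem?_eq_none (by omega)] at h
      simp at h
    have hcl : curr < (arr.length : Int) := by
      simp only [PySem.List.clampIdx] at hlt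
      split_ifs at hlt <;> omega
    omega

-- ===== PORT B =====
-- the while loop of Source B: state (s, curr, path); returns the final (curr, path)
def bLoop (k : Int) (arr : List Int) (s : Int) (curr : Int) (path : List Int) : Int × List Int :=
  if s < k ∧ curr ≠ (arr.length : Int) then
    match h : PySem.List.pyGet? arr curr with
    | none => (curr, path)                          -- IndexError in Python; outside Pre_
    | some x => bLoop k arr (s + x) (curr + 1) (path ++ [x])
  else (curr, path)
  termination_by (arr.length - curr).toNat
  decreasing_by
    have hin : ¬ (PySem.List.pyGet? arr curr = none) := by simp [h]
    rw [PySem.List.pyGet?_eq_none_iff] at hin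
    have : curr < (arr.length : Int) := by
      simp only [PySem.Raise.InRange, not_not] at hin; omega
    omega

def backtrack_alt (k : Int) (start : Int) (nextStart : Int) (curr : Int) (arr : List Int) (res : List (List Int)) (path : List Int) : Int × Int × List Int :=
  let r := bLoop k arr path.sum curr path           -- res.append(...) does not affect the return value
  (start, r.1, r.2)

-- ===== PRECONDITION & SPEC =====
-- Pre_ excludes cursors outside [-len(arr), len(arr)] whose path-sum is still below k: there A
-- either never returns (curr > len: unbounded recursion on the empty slice) or returns only via
-- Python's slice clamping to the array start (curr < -len), where B's direct arr[curr] raises IndexError.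
def Pre_backtrack (k : Int) (start : Int) (nextStart : Int) (curr : Int) (arr : List Int) (res : List (List Int)) (path : List Int) : Prop :=
  (-(arr.length : Int) ≤ curr ∧ curr ≤ (arr.length : Int)) ∨ k ≤ path.sum
instance (k : Int) (start : Int) (nextStart : Int) (curr : Int) (arr : List Int) (res : List (List Int)) (path : List Int) : Decidable (Pre_backtrack k start nextStart curr arr res path) := by unfold Pre_backtrack; infer_instance

def pvWitness_backtrack : Int × Int × Int × Int × List Int × List (List Int) × List Int := (3, 0, 0, 0, [1, 2, 5], [], [])

def Spec_backtrack (k : Int) (start : Int) (nextStart : Int) (curr : Int) (arr : List Int) (res : List (List Int)) (path : List Int) (out : Int × Int × List Int) : Prop := out = backtrack_alt k start nextStart curr arr res path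
instance (k : Int) (start : Int) (nextStart : Int) (curr : Int) (arr : List Int) (res : List (List Int)) (path : List Int) (out : Int × Int × List Int) : Decidable (Spec_backtrack k start nextStart curr arr res path out) := by unfold Spec_backtrack; infer_instance

-- ===== CLAIM (what is proved, stated in full; the proofs are below) =====
def Claim_equal_backtrack : Prop := ∀ (k : Int) (start : Int) (nextStart : Int) (curr : Int) (arr : List Int) (res : List (List Int)) (path : List Int), Dom_backtrack k start nextStart curr arr res path → Pre_backtrack k start nextStart curr arr res path → Spec_backtrack k start nextStart curr arr res path (backtrack k start nextStart curr arr res path)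

-- ===== LEMMAS AND PROOFS =====

-- the first element of arr[curr:] is arr[curr] whenever -len ≤ curr < len
lemma head_slice_eq_pyGet (arr : List Int) (curr : Int)
    (h1 : -(arr.length : Int) ≤ curr) (h2 : curr < (arr.length : Int)) :
    (PySem.List.slice arr (some curr) none).head? = PySem.List.pyGet? arr curr := by
  rw [PySem.List.slice_some_none, List.head?_drop]
  rcases (by omega : 0 ≤ curr ∨ curr < 0) with hp | hn
  · rw [PySem.List.pyGet?_of_nonneg arr hp]
    congr 1
    simp only [PySem.List.clampIdx]
    split_ifs <;> omega
  · have hk : curr = -(((-curr).toNat : Nat) : Int) := by omega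
    rw [hk, PySem.List.pyGet?_neg_natCast _ _ (by omega) (by omega),
        PySem.List.clampIdx_neg_natCast _ _ (by omega)]

-- main correspondence: A's recursion equals B's loop, by induction on the remaining length
lemma backtrack_eq_bLoop (k start nextStart : Int) (arr : List Int) (res : List (List Int)) :
    ∀ (N : Nat) (curr : Int) (path : List Int), (arr.length - curr).toNat ≤ N →
    ((-(arr.length : Int) ≤ curr ∧ curr ≤ (arr.length : Int)) ∨ k ≤ path.sum) →
    backtrack k start nextStart curr arr res path
      = (start, (bLoop k arr path.sum curr path).1, (bLoop k arr path.sum curr path).2) := by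
  intro N
  induction N with
  | zero =>
    intro curr path hN hpre
    by_cases hk : k ≤ path.sum
    · by_cases h : k = path.sum
      · rw [backtrack, bLoop, if_pos h, if_neg (by omega : ¬(path.sum < k ∧ curr ≠ (arr.length : Int)))]
      · rw [backtrack, bLoop, if_neg h, if_pos (by omega : path.sum > k),
            if_neg (by omega : ¬(path.sum < k ∧ curr ≠ (arr.length : Int)))]
    · rcases hpre with ⟨h1, h2⟩ | h
      · have hc : curr = (arr.length : Int) := by omega
        rw [backtrack, bLoop, if_neg (by omega : ¬ k = path.sum),
            if_neg (by omega : ¬ path.sum > k), if_pos hc,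
            if_neg (by simp [hc] : ¬(path.sum < k ∧ curr ≠ (arr.length : Int)))]
      · omega
  | succ n ih =>
    intro curr path hN hpre
    by_cases hk : k ≤ path.sum
    · by_cases h : k = path.sum
      · rw [backtrack, bLoop, if_pos h, if_neg (by omega : ¬(path.sum < k ∧ curr ≠ (arr.length : Int)))]
      · rw [backtrack, bLoop, if_neg h, if_pos (by omega : path.sum > k),
            if_neg (by omega : ¬(path.sum < k ∧ curr ≠ (arr.length : Int)))]
    · rcases hpre with ⟨h1, h2⟩ | h
      · rcases (by omega : curr = (arr.length : Int) ∨ curr < (arr.length : Int)) with hc | hc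
        · rw [backtrack, bLoop, if_neg (by omega : ¬ k = path.sum),
              if_neg (by omega : ¬ path.sum > k), if_pos hc,
              if_neg (by simp [hc] : ¬(path.sum < k ∧ curr ≠ (arr.length : Int)))]
        · have hget := head_slice_eq_pyGet arr curr h1 hc
          rw [backtrack, bLoop, if_neg (by omega : ¬ k = path.sum),
              if_neg (by omega : ¬ path.sum > k), if_neg (by omega : ¬ curr = (arr.length : Int)),
              if_pos (⟨by omega, by omega⟩ : path.sum < k ∧ curr ≠ (arr.length : Int))]
          rw [traversalA_eq_head?, hget]
          split
          · rfl
          · rename_i x1 h1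
            have hrec := ih (curr + 1) (path ++ [x1]) (by omega) (Or.inl ⟨by omega, by omega⟩)
            rw [hrec]
            simp
      · omega

-- ===== VERDICT (by name: the statement is the Claim_ definition above) =====
theorem backtrack_spec : Claim_equal_backtrack := by
  intro k start nextStart curr arr res path _ hpre
  unfold Spec_backtrack backtrack_alt
  exact backtrack_eq_bLoop k start nextStart arr res (arr.length - curr).toNat curr path le_rfl hpre
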